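-- pv_equiv track=rewrite | github.com/jocelynzungchen/SGP-extraction | get_ch_patterns.py | gen_vh_possibilities
-- ===== SOURCE A (Python) =====
-- from typing import List, Tuple
--
-- def gen_vh_possibilities(text: List[str], index: int, poss: List[str]) -> List[str]:
--
--     def gen_cand(list_):
--         new_list = []
--         for string in list_:
--             new_list += [string+' v']
--             new_list += [string+' adj']
--         return new_list
--
--     if index >= len(text):
--         return poss
--     if index == 0:
--         poss = [text[0]]
--     else:
--         poss = gen_cand(poss) if text[index] == 'vh' else [string + ' ' + text[index] for string in poss]
--     return gen_vh_possibilities(text, index+1, poss)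
-- ===== SOURCE B (Python) =====
-- from typing import List
--
-- def gen_vh_possibilities(text: List[str], index: int, poss: List[str]) -> List[str]:
--     n = len(text)
--     while index < n:
--         if index == 0:
--             poss = [text[0]]
--         elif text[index] == 'vh':
--             poss = [s + suf for s in poss for suf in (' v', ' adj')]
--         else:
--             poss = [s + ' ' + text[index] for s in poss]
--         index += 1
--     return poss
-- ===== Notes on version B (the rewrite author's own statement) =====
-- stated objective: simpler
-- what changed: Replaced the tail recursion plus the element-by-element += loop of gen_cand with a single iterative while-loop whose branches are single comprehensions (no Python-level recursion, no repeated list concatenation).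
import Mathlib
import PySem

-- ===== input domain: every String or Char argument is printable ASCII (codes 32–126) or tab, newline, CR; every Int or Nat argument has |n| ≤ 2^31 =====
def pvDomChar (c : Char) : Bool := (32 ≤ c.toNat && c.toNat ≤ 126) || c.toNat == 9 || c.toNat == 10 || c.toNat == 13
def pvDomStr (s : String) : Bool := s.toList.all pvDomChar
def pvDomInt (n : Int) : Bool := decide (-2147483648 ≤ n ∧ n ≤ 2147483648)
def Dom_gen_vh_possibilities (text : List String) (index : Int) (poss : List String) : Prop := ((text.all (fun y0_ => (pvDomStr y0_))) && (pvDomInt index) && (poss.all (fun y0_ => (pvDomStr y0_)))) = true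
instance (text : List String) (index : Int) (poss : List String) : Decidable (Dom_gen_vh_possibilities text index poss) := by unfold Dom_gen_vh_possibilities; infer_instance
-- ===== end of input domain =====

-- B replaces A's tail recursion + gen_cand helper with a single iterative loop over the
-- remaining indices whose 'vh' branch is one nested comprehension (objective: simpler).


-- ===== PORT A =====
-- helper gen_cand: loop accumulating new_list, exactly as in A
def pvGenCand (list_ : List String) : List String :=
  list_.foldl (fun new_list s => new_list ++ [s ++ " v"] ++ [s ++ " adj"]) []

-- text[index] is ported with pyGet? (none = IndexError, excluded by Pre_); getD "" is never
-- reached inside Pre_.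
def gen_vh_possibilities (text : List String) (index : Int) (poss : List String) : List String :=
  if _h : index ≥ (text.length : Int) then poss
  else
    let poss' :=
      if index = 0 then [(PySem.List.pyGet? text 0).getD ""]
      else if (PySem.List.pyGet? text index).getD "" = "vh" then pvGenCand poss
      else poss.map (fun s => s ++ " " ++ (PySem.List.pyGet? text index).getD "")
    gen_vh_possibilities text (index + 1) poss'
termination_by ((text.length : Int) - index).toNat
decreasing_by omega

-- ===== PORT B =====
def gen_vh_possibilities_alt (text : List String) (index : Int) (poss : List String) : List String :=
  (PySem.List.pyRange index (text.length : Int) 1).foldl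
    (fun acc i =>
      if i = 0 then [(PySem.List.pyGet? text 0).getD ""]
      else if (PySem.List.pyGet? text i).getD "" = "vh" then
        acc.flatMap (fun s => [s ++ " v", s ++ " adj"])
      else acc.map (fun s => s ++ " " ++ (PySem.List.pyGet? text i).getD ""))
    poss

-- ===== PRECONDITION & SPEC =====
-- Pre_ excludes exactly the inputs where A raises IndexError: a start index below -len(text)
-- makes the first negative access text[index] go out of range.
def Pre_gen_vh_possibilities (text : List String) (index : Int) (poss : List String) : Prop :=
  -(text.length : Int) ≤ index

instance (text : List String) (index : Int) (poss : List String) : Decidable (Pre_gen_vh_possibilities text index poss) := by unfold Pre_gen_vh_possibilities; infer_instance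

def pvWitness_gen_vh_possibilities : List String × Int × List String :=
  (["a", "vh", "b"], 0, ["x"])

def Spec_gen_vh_possibilities (text : List String) (index : Int) (poss : List String) (out : List String) : Prop := out = gen_vh_possibilities_alt text index poss
instance (text : List String) (index : Int) (poss : List String) (out : List String) : Decidable (Spec_gen_vh_possibilities text index poss out) := by unfold Spec_gen_vh_possibilities; infer_instance

-- ===== CLAIM (what is proved, stated in full; the proofs are below) =====
def Claim_equal_gen_vh_possibilities : Prop := ∀ (text : List String) (index : Int) (poss : List String), Dom_gen_vh_possibilities text index poss → Pre_gen_vh_possibilities text index poss → Spec_gen_vh_possibilities text index poss (gen_vh_possibilities text index poss)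

-- ===== LEMMAS AND PROOFS =====

-- gen_cand's accumulator loop equals the flatMap comprehension of B
theorem pvGenCand_eq_flatMap (l : List String) :
    pvGenCand l = l.flatMap (fun s => [s ++ " v", s ++ " adj"]) := by
  unfold pvGenCand
  have h : ∀ acc : List String,
      l.foldl (fun new_list s => new_list ++ [s ++ " v"] ++ [s ++ " adj"]) acc
        = acc ++ l.flatMap (fun s => [s ++ " v", s ++ " adj"]) := by
    induction l with
    | nil => simp
    | cons x xs ih =>
        intro acc
        rw [List.foldl_cons, ih, List.flatMap_cons]
        simp
  simpa using h []

-- A's recursion equals B's fold over the remaining indices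
theorem pv_main (text : List String) (index : Int) (poss : List String) :
    gen_vh_possibilities text index poss = gen_vh_possibilities_alt text index poss := by
  unfold gen_vh_possibilities_alt
  by_cases h : index ≥ (text.length : Int)
  · rw [gen_vh_possibilities]
    have : PySem.List.pyRange index (text.length : Int) 1 = [] := by
      simp [PySem.List.pyRange_one]
      omega
    simp [h, this]
  · rw [gen_vh_possibilities]
    have hlt : index < (text.length : Int) := by omega
    rw [PySem.List.pyRange_one_cons hlt]
    simp only [h, dite_false, List.foldl_cons]
    rw [pv_main text (index + 1)]
    unfold gen_vh_possibilities_alt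
    by_cases h0 : index = 0
    · simp [h0]
    · simp only [h0, if_false]
      by_cases hv : (PySem.List.pyGet? text index).getD "" = "vh"
      · simp [hv, pvGenCand_eq_flatMap]
      · simp [hv]
termination_by ((text.length : Int) - index).toNat
decreasing_by omega

-- ===== VERDICT (by name: the statement is the Claim_ definition above) =====
theorem gen_vh_possibilities_spec : Claim_equal_gen_vh_possibilities := by
  intro text index poss _ _
  exact pv_main text index poss
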